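-- pv_equiv track=rewrite | github.com/Nipush/bookbot | main.py | get_number_alphabet_characters
-- ===== SOURCE A (Python) =====
-- def get_number_alphabet_characters(text: str) -> str:
--     alphabet = "abcdefghijklmnopqrstuvwxyz"
--     characters = {}
--     result = ""
--
--     for char in text.lower():
--         if char in alphabet:
--             if char in characters:
--                 characters[char] += 1
--             else:
--                 characters[char] = 1
--
--     for char in alphabet:
--         if char in characters:
--             result += f"The '{char}' character was found {characters[char]} times\n"
--
--     return result
-- ===== SOURCE B (Python) =====
-- def get_number_alphabet_characters(text: str) -> str:
--     alphabet = "abcdefghijklmnopqrstuvwxyz"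
--     letters = sorted(c for c in text.lower() if c in alphabet)
--
--     def emit(ls):
--         if not ls:
--             return ""
--         c = ls[0]
--         n = 1
--         while n < len(ls) and ls[n] == c:
--             n += 1
--         return f"The '{c}' character was found {n} times\n" + emit(ls[n:])
--
--     return emit(letters)
-- ===== Notes on version B (the rewrite author's own statement) =====
-- stated objective: alternative
-- what changed: Replaces A's one-pass frequency-dict build plus ordered emit over the alphabet with sort-then-run-length-encode: the letters are extracted, sorted, and the report is produced recursively by scanning equal runs, so no frequency table and no alphabet loop exist at all.
import Mathlib
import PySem

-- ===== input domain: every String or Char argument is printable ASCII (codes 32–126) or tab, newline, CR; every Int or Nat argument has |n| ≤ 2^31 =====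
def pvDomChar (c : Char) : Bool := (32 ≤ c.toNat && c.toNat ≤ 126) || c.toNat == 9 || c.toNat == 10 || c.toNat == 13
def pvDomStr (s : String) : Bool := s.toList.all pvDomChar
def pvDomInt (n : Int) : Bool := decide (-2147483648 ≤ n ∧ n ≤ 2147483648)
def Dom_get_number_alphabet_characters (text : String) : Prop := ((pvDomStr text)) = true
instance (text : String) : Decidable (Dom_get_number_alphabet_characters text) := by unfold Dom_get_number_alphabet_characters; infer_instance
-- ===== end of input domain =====

-- B replaces A's frequency-dict build + alphabet-ordered emit with sort-then-run-length-encode: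
-- extract and sort the letters, then recursively emit one line per equal run (alternative algorithm).

-- ===== PORT A =====
def get_number_alphabet_characters (text : String) : String :=
  let alphabet : List Char := "abcdefghijklmnopqrstuvwxyz".toList
  let characters : PySem.Dict Char Int :=
    (PySem.Chars.lower text.toList).foldl
      (fun d c =>
        if c ∈ alphabet then
          if d.contains c then d.insert c (d.getD c 0 + 1) else d.insert c 1
        else d)
      PySem.Dict.empty
  let result : String :=
    alphabet.foldl
      (fun r c =>
        if characters.contains c then
          r ++ "The '" ++ String.ofList [c] ++ "' character was found "
            ++ PySem.Int.toStr (characters.getD c 0) ++ " times\n"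
        else r)
      ""
  result

-- ===== PORT B =====
-- the inner while loop of Source B's emit: scan forward while the character repeats
def pvCountRun (c : Char) : List Char → Nat
  | [] => 0
  | x :: xs => if x == c then 1 + pvCountRun c xs else 0

-- Source B's recursive emit: one report line per run of equal letters, then recurse on the rest
def pvEmit : List Char → String
  | [] => ""
  | c :: rest =>
    let n : Nat := 1 + pvCountRun c rest
    "The '" ++ String.ofList [c] ++ "' character was found "
      ++ PySem.Int.toStr (n : Int) ++ " times\n"
      ++ pvEmit ((c :: rest).drop n)
termination_by ls => ls.length
decreasing_by
  simp [List.length_drop]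

def get_number_alphabet_characters_alt (text : String) : String :=
  let alphabet : List Char := "abcdefghijklmnopqrstuvwxyz".toList
  let letters : List Char :=
    PySem.List.sorted ((PySem.Chars.lower text.toList).filter (fun c => decide (c ∈ alphabet)))
      (fun c => c) false
  pvEmit letters

-- ===== PRECONDITION & SPEC =====
def Spec_get_number_alphabet_characters (text : String) (out : String) : Prop := out = get_number_alphabet_characters_alt text
instance (text : String) (out : String) : Decidable (Spec_get_number_alphabet_characters text out) := by unfold Spec_get_number_alphabet_characters; infer_instance

-- ===== CLAIM (what is proved, stated in full; the proofs are below) =====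
def Claim_equal_get_number_alphabet_characters : Prop := ∀ (text : String), Dom_get_number_alphabet_characters text → Spec_get_number_alphabet_characters text (get_number_alphabet_characters text)

-- ===== LEMMAS AND PROOFS =====

-- one report line
def pvLine (c : Char) (n : Int) : String :=
  "The '" ++ String.ofList [c] ++ "' character was found " ++ PySem.Int.toStr n ++ " times\n"

-- the canonical form both programs are reduced to
def pvReport (s : List Char) (al : List Char) : String :=
  al.foldr (fun c r => if 0 < s.count c then pvLine c ((s.count c : Nat) : Int) ++ r else r) ""

-- A's guarded insert is always `insert c (getD c 0 + 1)`.
lemma pv_insert_branch_eq (d : PySem.Dict Char Int) (c : Char) :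
    (if d.contains c then d.insert c (d.getD c 0 + 1) else d.insert c 1) =
      d.insert c (d.getD c 0 + 1) := by
  by_cases h : d.contains c = true
  · simp [h]
  · simp only [Bool.not_eq_true] at h
    rw [PySem.Dict.getD_of_not_contains d 0 h]; simp [h]

-- A's dict equals the counter of the alphabet-filtered lowered text.
lemma pv_dict_eq_counter (l : List Char) (alphabet : List Char) :
    l.foldl
      (fun d c =>
        if c ∈ alphabet then
          if d.contains c then d.insert c (d.getD c 0 + 1) else d.insert c 1
        else d)
      PySem.Dict.empty
      = PySem.Dict.counter (l.filter (fun c => decide (c ∈ alphabet))) := by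
  have h1 : l.foldl
      (fun d c =>
        if c ∈ alphabet then
          if d.contains c then d.insert c (d.getD c 0 + 1) else d.insert c 1
        else d)
      PySem.Dict.empty
      = l.foldl
        (fun d c => if decide (c ∈ alphabet) then d.insert c (d.getD c 0 + 1) else d)
        (PySem.Dict.empty : PySem.Dict Char Int) := by
    apply PySem.List.foldl_congr_mem
    intro d c _
    by_cases h : c ∈ alphabet <;> simp [h, pv_insert_branch_eq]
  rw [h1, ← List.foldl_filter]
  exact PySem.Dict.foldl_insert_getD_add_one_eq_counter _

-- string foldl with appended pieces = pieces folded from the right onto the accumulator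
lemma pv_foldl_append_str (al : List Char) (g : Char → String) :
    ∀ (acc : String),
      al.foldl (fun r c => r ++ g c) acc = acc ++ al.foldr (fun c r => g c ++ r) "" := by
  induction al with
  | nil => intro acc; simp [String.append_empty]
  | cons a al ih =>
    intro acc
    simp only [List.foldl_cons, List.foldr_cons, ih, String.append_assoc]

-- A's emit loop equals pvReport
lemma pv_A_emit_eq_report (al s : List Char) :
    al.foldl (fun r c => if 0 < s.count c then r ++ pvLine c ((s.count c : Nat) : Int) else r) ""
      = pvReport s al := by
  have hfun : (fun (r : String) (c : Char) =>
      if 0 < s.count c then r ++ pvLine c ((s.count c : Nat) : Int) else r)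
      = fun r c => r ++ (if 0 < s.count c then pvLine c ((s.count c : Nat) : Int) else "") := by
    funext r c
    by_cases h : 0 < s.count c <;> simp [h, String.append_empty]
  have hfun2 : (fun (c : Char) (r : String) =>
      if 0 < s.count c then pvLine c ((s.count c : Nat) : Int) ++ r else r)
      = fun c r => (if 0 < s.count c then pvLine c ((s.count c : Nat) : Int) else "") ++ r := by
    funext c r
    by_cases h : 0 < s.count c <;> simp [h, String.empty_append]
  rw [hfun, pv_foldl_append_str, String.empty_append, pvReport, hfun2]

-- the run scan on a sorted tail whose elements are all ≥ a: it finds exactly the a's,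
-- the prefix is all a's, and what remains is sorted and strictly above a
lemma pv_run_spec (a : Char) :
    ∀ (s : List Char), s.Pairwise (· ≤ ·) → (∀ x ∈ s, a ≤ x) →
      pvCountRun a s = s.count a ∧
      (∀ x ∈ s.drop (pvCountRun a s), a < x) ∧
      (s.drop (pvCountRun a s)).Pairwise (· ≤ ·) := by
  intro s
  induction s with
  | nil => intro _ _; exact ⟨rfl, by simp, by simp⟩
  | cons x xs ih =>
    intro hp hge
    rcases List.pairwise_cons.mp hp with ⟨hx_le, hp'⟩
    by_cases hx : x = a
    · subst hx
      have hge' : ∀ y ∈ xs, x ≤ y := hx_le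
      obtain ⟨h1, h2, h3⟩ := ih hp' hge'
      refine ⟨?_, ?_, ?_⟩
      · simp [pvCountRun, List.count_cons_self, h1]; omega
      · intro y hy
        have heq : (x :: xs).drop (pvCountRun x (x :: xs)) = xs.drop (pvCountRun x xs) := by
          simp only [pvCountRun, BEq.rfl, if_true, Nat.add_comm 1, List.drop_succ_cons]
        rw [heq] at hy
        exact h2 y hy
      · have heq : (x :: xs).drop (pvCountRun x (x :: xs)) = xs.drop (pvCountRun x xs) := by
          simp only [pvCountRun, BEq.rfl, if_true, Nat.add_comm 1, List.drop_succ_cons]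
        rw [heq]; exact h3
    · have hlt : a < x := lt_of_le_of_ne (hge x List.mem_cons_self) (fun h => hx h.symm)
      have hall : ∀ y ∈ x :: xs, a < y := by
        intro y hy
        rcases List.mem_cons.mp hy with rfl | hy'
        · exact hlt
        · exact lt_of_lt_of_le hlt (hx_le y hy')
      have hrun : pvCountRun a (x :: xs) = 0 := by
        simp [pvCountRun, hx]
      refine ⟨?_, ?_, ?_⟩
      · rw [hrun]
        symm
        rw [List.count_eq_zero]
        intro hmem
        exact absurd rfl (ne_of_gt (hall a hmem))
      · rw [hrun]; simpa using hall
      · rw [hrun]; simpa using hp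
  
-- pvReport only depends on the counts of the listed letters
lemma pv_report_congr (al : List Char) (s d : List Char)
    (h : ∀ c ∈ al, s.count c = d.count c) : pvReport s al = pvReport d al := by
  induction al with
  | nil => rfl
  | cons a al ih =>
    have ha := h a List.mem_cons_self
    simp only [pvReport, List.foldr_cons] at *
    rw [ha, ih (fun c hc => h c (List.mem_cons_of_mem a hc))]

-- key lemma: run-length emit of a sorted letter list = the alphabet-ordered report
lemma pv_emit_eq_report (al : List Char) :
    ∀ (s : List Char), al.Pairwise (· < ·) → s.Pairwise (· ≤ ·) → (∀ x ∈ s, x ∈ al) →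
      pvEmit s = pvReport s al := by
  induction al with
  | nil =>
    intro s _ _ hsub
    have : s = [] := by
      cases s with
      | nil => rfl
      | cons x xs => exact absurd (hsub x List.mem_cons_self) (List.not_mem_nil)
    subst this; simp [pvEmit, pvReport]
  | cons a al ih =>
    intro s hal hs hsub
    rcases List.pairwise_cons.mp hal with ⟨ha_lt, hal'⟩
    by_cases hmem : a ∈ s
    · cases s with
      | nil => exact absurd hmem (List.not_mem_nil)
      | cons x s' =>
        rcases List.pairwise_cons.mp hs with ⟨hx_le, hs'⟩
        have hxa : x = a := by
          rcases List.mem_cons.mp (hsub x List.mem_cons_self) with h | h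
          · exact h
          · exfalso
            have hax : a < x := ha_lt x h
            rcases List.mem_cons.mp hmem with rfl | h'
            · exact lt_irrefl _ hax
            · exact absurd (hx_le a h') (not_le.mpr hax)
        subst hxa
        have hge' : ∀ y ∈ s', x ≤ y := hx_le
        obtain ⟨hk, hgt, hpd⟩ := pv_run_spec x s' hs' hge'
        have htake : ∀ y ∈ s'.take (pvCountRun x s'), y = x := by
          -- the scanned prefix is exactly the run of x's
          intro y hy
          have h1 : s'.count x = (s'.take (pvCountRun x s')).count x + (s'.drop (pvCountRun x s')).count x := by
            conv_lhs => rw [← List.take_append_drop (pvCountRun x s') s']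
            rw [List.count_append]
          have h2 : (s'.drop (pvCountRun x s')).count x = 0 := by
            rw [List.count_eq_zero]
            intro hmem'
            exact absurd rfl (ne_of_gt (hgt x hmem'))
          have h3 : (s'.take (pvCountRun x s')).count x = pvCountRun x s' := by omega
          have hlen : (s'.take (pvCountRun x s')).length ≤ pvCountRun x s' := List.length_take_le _ _
          have := List.count_le_length (l := s'.take (pvCountRun x s')) (a := x)
          have hcl : (s'.take (pvCountRun x s')).count x = (s'.take (pvCountRun x s')).length := by omega
          exact ((List.count_eq_length.mp hcl) y hy).symm
        set k := pvCountRun x s' with hkdef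
        set d := s'.drop k with hddef
        have hdrop : (x :: s').drop (1 + k) = d := by
          have : 1 + k = k + 1 := by omega
          rw [this]; rfl
        have hemit : pvEmit (x :: s') = pvLine x ((1 + k : Nat) : Int) ++ pvEmit d := by
          rw [pvEmit]
          simp only [← hkdef, hdrop, pvLine, String.append_assoc]
        have hcount_a : (x :: s').count x = 1 + k := by
          rw [List.count_cons_self, ← hk]; omega
        have hsub' : ∀ y ∈ d, y ∈ al := by
          intro y hy
          have hy_s' : y ∈ s' := List.mem_of_mem_drop hy
          rcases List.mem_cons.mp (hsub y (List.mem_cons_of_mem x hy_s')) with rfl | h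
          · exact absurd rfl (ne_of_gt (hgt y hy))
          · exact h
        have hcounts : ∀ c ∈ al, (x :: s').count c = d.count c := by
          intro c hc
          have hcx : c ≠ x := fun h => absurd (ha_lt c hc) (by rw [h]; exact lt_irrefl x)
          rw [show (x :: s').count c = s'.count c by simp [Ne.symm hcx]]
          conv_lhs => rw [← List.take_append_drop k s']
          rw [List.count_append, ← hddef]
          have : (s'.take k).count c = 0 := by
            rw [List.count_eq_zero]
            intro hmem'
            exact hcx (htake c hmem')
          omega
        have hrep : pvReport (x :: s') al = pvReport d al := pv_report_congr al _ _ hcounts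
        have hcond : 0 < (x :: s').count x := by rw [hcount_a]; omega
        calc pvEmit (x :: s')
            = pvLine x ((1 + k : Nat) : Int) ++ pvEmit d := hemit
          _ = pvLine x (((x :: s').count x : Nat) : Int) ++ pvReport d al := by
              rw [hcount_a, ih d hal' hpd hsub']
          _ = pvReport (x :: s') (x :: al) := by
              rw [← hrep]
              simp only [pvReport, List.foldr_cons, if_pos hcond]
    · have hcnt : s.count a = 0 := List.count_eq_zero.mpr hmem
      have hsub' : ∀ y ∈ s, y ∈ al := by
        intro y hy
        rcases List.mem_cons.mp (hsub y hy) with rfl | h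
        · exact absurd hy hmem
        · exact h
      rw [ih s hal' hs hsub']
      simp only [pvReport, List.foldr_cons, hcnt]
      simp

-- ===== VERDICT (by name: the statement is the Claim_ definition above) =====
theorem get_number_alphabet_characters_spec : Claim_equal_get_number_alphabet_characters := by
  intro text _
  unfold Spec_get_number_alphabet_characters get_number_alphabet_characters get_number_alphabet_characters_alt
  simp only
  set t := PySem.Chars.lower text.toList with ht
  set alphabet : List Char := "abcdefghijklmnopqrstuvwxyz".toList with halpha
  set s0 : List Char := t.filter (fun c => decide (c ∈ alphabet)) with hs0
  set letters : List Char := PySem.List.sorted s0 (fun c => c) false with hletters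
  -- A side: dict = counter s0, then the emit loop is pvReport s0 alphabet
  rw [pv_dict_eq_counter]
  have hA : alphabet.foldl
      (fun r c =>
        if (PySem.Dict.counter s0).contains c then
          r ++ "The '" ++ String.ofList [c] ++ "' character was found "
            ++ PySem.Int.toStr ((PySem.Dict.counter s0).getD c 0) ++ " times\n"
        else r) ""
      = alphabet.foldl
        (fun r c => if 0 < s0.count c then r ++ pvLine c ((s0.count c : Nat) : Int) else r) "" := by
    apply PySem.List.foldl_congr_mem
    intro r c _
    rw [PySem.Dict.contains_counter, PySem.Dict.getD_counter]
    by_cases h : 0 < s0.count c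
    · have hc1 : c ∈ s0 := List.count_pos_iff.mp h
      have hc2 : s0.contains c = true := by simpa using hc1
      rw [if_pos hc2, if_pos h]
      simp only [pvLine, String.append_assoc]
    · have : c ∉ s0 := fun hc => h (List.count_pos_iff.mpr hc)
      simp [this, h]
  rw [hA, pv_A_emit_eq_report]
  -- B side: pvEmit letters = pvReport letters alphabet = pvReport s0 alphabet
  have hperm : letters.Perm s0 := PySem.List.sorted_perm s0 (fun c => c) false
  have hB : pvEmit letters = pvReport letters alphabet := by
    apply pv_emit_eq_report
    · decide
    · have := PySem.List.sorted_pairwise (xs := s0) (key := fun c : Char => c)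
      simpa using this
    · intro x hx
      have : x ∈ s0 := (PySem.List.mem_sorted _ _ _ x).mp hx
      have := List.mem_filter.mp this
      simpa using this.2
  rw [hB, pv_report_congr alphabet letters s0 (fun c _ => hperm.count_eq c)]
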